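-- pv_equiv track=rewrite | github.com/Matthiti/Advent-of-Code-2019 | Day 4.py | adjacent_digits_not_part_of_larger_group
-- ===== SOURCE A (Python) =====
-- def adjacent_digits_not_part_of_larger_group(number: int) -> bool:
-- 	result = False
-- 	string = str(number)
-- 	previous = string[0]
-- 	part_of_larger_group = False
-- 	for i in range(1, len(string)):
-- 		if previous == string[i]:
-- 			if result or part_of_larger_group:
-- 				result = False
-- 				part_of_larger_group = True
-- 			else:
-- 				result = True
-- 				part_of_larger_group = False
-- 		elif result and not part_of_larger_group:
-- 			return True
-- 		else:
-- 			part_of_larger_group = False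
-- 			result = False
-- 		previous = string[i]
-- 	return result and not part_of_larger_group
-- ===== SOURCE B (Python) =====
-- def adjacent_digits_not_part_of_larger_group(number: int) -> bool:
--     s = str(number)
--     lengths = []
--     i = 0
--     while i < len(s):
--         j = i
--         while j < len(s) and s[j] == s[i]:
--             j += 1
--         lengths.append(j - i)
--         i = j
--     return any(n == 2 for n in lengths)
-- ===== Notes on version B (the rewrite author's own statement) =====
-- stated objective: simpler
-- what changed: B replaces A's incremental result/part_of_larger_group flag machine with a two-pointer scan that materializes the run lengths of str(number) and then checks whether any run length is exactly 2.
import Mathlib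
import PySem

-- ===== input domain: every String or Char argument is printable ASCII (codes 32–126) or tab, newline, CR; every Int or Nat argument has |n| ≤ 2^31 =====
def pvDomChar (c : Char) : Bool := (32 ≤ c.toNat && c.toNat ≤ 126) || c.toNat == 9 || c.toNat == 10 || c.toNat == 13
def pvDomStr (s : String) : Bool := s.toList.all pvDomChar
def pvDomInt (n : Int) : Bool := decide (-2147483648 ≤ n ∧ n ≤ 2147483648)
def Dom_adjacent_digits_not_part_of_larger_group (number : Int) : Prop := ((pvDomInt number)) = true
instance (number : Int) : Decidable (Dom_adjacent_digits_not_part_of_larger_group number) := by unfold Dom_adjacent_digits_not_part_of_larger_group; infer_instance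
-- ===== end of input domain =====

-- B replaces A's result/part_of_larger_group flag machine with a two-pointer scan that
-- collects the run lengths of str(number) and checks whether any run has length exactly 2.


-- ===== PORT A =====
-- the for-loop over string[1:], carrying (previous, result, part_of_larger_group);
-- the `return True` inside the loop becomes the `true` leaf
def pvLoopA (previous : Char) (result plg : Bool) : List Char → Bool
  | [] => result && !plg
  | c :: rest =>
    if previous == c then
      if result || plg then pvLoopA c false true rest
      else pvLoopA c true false rest
    else if result && !plg then true
    else pvLoopA c false false rest

def adjacent_digits_not_part_of_larger_group (number : Int) : Bool :=
  match (PySem.Int.toStr number).toList with   -- string = str(number)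
  | [] => false   -- unreachable: str(int) is never empty, so string[0] cannot raise
  | previous :: rest => pvLoopA previous false false rest

-- ===== PORT B =====
-- two-pointer scan: the inner while counts the run of s[i] (j - i = run length)
def pvRunLengths : List Char → List Nat
  | [] => []
  | c :: rest =>
    let k := (rest.takeWhile (· == c)).length + 1
    k :: pvRunLengths (rest.drop (k - 1))
termination_by l => l.length
decreasing_by simp [List.length_drop]

def adjacent_digits_not_part_of_larger_group_alt (number : Int) : Bool :=
  (pvRunLengths (PySem.Int.toStr number).toList).any (· == 2)

-- ===== PRECONDITION & SPEC =====
def Spec_adjacent_digits_not_part_of_larger_group (number : Int) (out : Bool) : Prop := out = adjacent_digits_not_part_of_larger_group_alt number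
instance (number : Int) (out : Bool) : Decidable (Spec_adjacent_digits_not_part_of_larger_group number out) := by unfold Spec_adjacent_digits_not_part_of_larger_group; infer_instance

-- ===== CLAIM (what is proved, stated in full; the proofs are below) =====
def Claim_equal_adjacent_digits_not_part_of_larger_group : Prop := ∀ (number : Int), Dom_adjacent_digits_not_part_of_larger_group number → Spec_adjacent_digits_not_part_of_larger_group number (adjacent_digits_not_part_of_larger_group number)

-- ===== LEMMAS AND PROOFS =====
theorem pvRunLengths_nil : pvRunLengths [] = [] := by
  rw [pvRunLengths.eq_def]

theorem pvRunLengths_cons (c : Char) (rest : List Char) :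
    pvRunLengths (c :: rest)
      = ((rest.takeWhile (· == c)).length + 1)
        :: pvRunLengths (rest.drop (rest.takeWhile (· == c)).length) := by
  rw [pvRunLengths.eq_def]
  simp

theorem pv_decide_beq (a b : ℕ) : decide (a = b) = (a == b) := by
  by_cases h : a = b <;> simp [h]

theorem pv_drop_length_takeWhile {p : Char → Bool} (l : List Char) :
    l.drop (l.takeWhile p).length = l.dropWhile p := by
  induction l with
  | nil => rfl
  | cons c t ih =>
    by_cases h : p c = true
    · simp [List.takeWhile, List.dropWhile, h, ih]
    · simp [List.takeWhile, List.dropWhile, h]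

theorem pvRunLengths_cons' (c : Char) (rest : List Char) :
    pvRunLengths (c :: rest)
      = ((rest.takeWhile (· == c)).length + 1)
        :: pvRunLengths (rest.dropWhile (· == c)) := by
  rw [pvRunLengths_cons, pv_drop_length_takeWhile]

-- invariant: A's flags encode the length class n of the current run ending at `previous`
theorem pv_key (rest : List Char) : ∀ (previous : Char) (n : ℕ), 1 ≤ n →
    pvLoopA previous (decide (n = 2)) (decide (3 ≤ n)) rest
      = ((decide (n + (rest.takeWhile (· == previous)).length = 2))
          || (pvRunLengths (rest.dropWhile (· == previous))).any (· == 2)) := by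
  induction rest with
  | nil =>
    intro previous n hn
    simp only [pvLoopA, List.takeWhile_nil, List.dropWhile_nil, List.length_nil,
      Nat.add_zero, pvRunLengths_nil, List.any_nil, Bool.or_false]
    by_cases h2 : n = 2
    · subst h2; simp
    · simp [h2]
  | cons c t ih =>
    intro previous n hn
    by_cases hc : previous = c
    · subst hc
      have step : pvLoopA previous (decide (n = 2)) (decide (3 ≤ n)) (previous :: t)
          = pvLoopA previous (decide (n + 1 = 2)) (decide (3 ≤ n + 1)) t := by
        rcases Nat.lt_or_ge n 2 with h | h
        · have hn1 : n = 1 := by omega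
          subst hn1
          simp [pvLoopA]
        · have e1 : (decide (n = 2) || decide (3 ≤ n)) = true := by
            simp only [Bool.or_eq_true, decide_eq_true_eq]; omega
          have e2 : decide (n + 1 = 2) = false := by
            simp only [decide_eq_false_iff_not]; omega
          have e3 : decide (3 ≤ n + 1) = true := by
            simp only [decide_eq_true_eq]; omega
          simp only [pvLoopA, beq_self_eq_true, if_true, e1, e2, e3]
      rw [step, ih previous (n + 1) (by omega)]
      simp only [List.takeWhile_cons, beq_self_eq_true, if_true, List.dropWhile_cons,
        List.length_cons]
      congr 1
      simp only [decide_eq_decide]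
      omega
    · have hbe : (previous == c) = false := by simp [hc]
      have hbe' : (c == previous) = false := by simp [Ne.symm hc]
      have hrhs : ((decide (n + ((c :: t).takeWhile (· == previous)).length = 2))
            || (pvRunLengths ((c :: t).dropWhile (· == previous))).any (· == 2))
          = ((decide (n = 2)) || (pvRunLengths (c :: t)).any (· == 2)) := by
        simp [hbe']
      rw [hrhs]
      by_cases h2 : n = 2
      · subst h2
        simp [pvLoopA, hbe]
      · have hstep : pvLoopA previous (decide (n = 2)) (decide (3 ≤ n)) (c :: t)
            = pvLoopA c false false t := by
          simp [pvLoopA, hbe, h2]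
        have hih : pvLoopA c false false t
            = ((decide (1 + (t.takeWhile (· == c)).length = 2))
                || (pvRunLengths (t.dropWhile (· == c))).any (· == 2)) := by
          simpa using ih c 1 (by omega)
        rw [hstep, hih, pvRunLengths_cons' c t]
        simp only [List.any_cons]
        have hn2 : (decide (n = 2)) = false := by simp [h2]
        rw [hn2]
        simp only [Bool.false_or]
        congr 1
        rw [← pv_decide_beq]
        simp only [decide_eq_decide]
        omega

-- ===== VERDICT (by name: the statement is the Claim_ definition above) =====
theorem adjacent_digits_not_part_of_larger_group_spec : Claim_equal_adjacent_digits_not_part_of_larger_group := by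
  intro number _
  unfold Spec_adjacent_digits_not_part_of_larger_group
  unfold adjacent_digits_not_part_of_larger_group adjacent_digits_not_part_of_larger_group_alt
  cases hs : (PySem.Int.toStr number).toList with
  | nil => simp [pvRunLengths_nil]
  | cons p rest =>
    show pvLoopA p false false rest = (pvRunLengths (p :: rest)).any (· == 2)
    have h := pv_key rest p 1 (by omega)
    simp only [show (decide (1 = 2)) = false from rfl,
      show (decide (3 ≤ 1)) = false from rfl] at h
    rw [h, pvRunLengths_cons' p rest]
    simp only [List.any_cons]
    congr 1
    rw [← pv_decide_beq]
    simp only [decide_eq_decide]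
    omega
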